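-- pv_equiv track=rewrite | github.com/jsgoldstein/hammurabis-code | advent_of_code/2015/presents-day3.py | walk_grid_with_robo
-- ===== SOURCE A (Python) =====
-- from typing import Set, Tuple
--
-- class Locataion:
--     def __init__(self):
--         self.x = 0
--         self.y = 0
--         self.visited: dict[Tuple[int, int], bool] = {}
--         self.__mark_visit()
--
--     def move(self, direction: str) -> None:
--         assert direction in ('^', '>', 'v', '<')
--         if direction == '^':
--             self.y = self.y + 1
--         elif direction == '>':
--             self.x = self.x + 1
--         elif direction == 'v':
--             self.y = self.y - 1
--         else:  # direction == '<':
--             self.x = self.x - 1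
--
--         self.__mark_visit()
--
--     def __mark_visit(self) -> None:
--         pos = (self.x, self.y)
--         self.visited[pos] = True
--
--     def get_visited(self) -> int:
--         return len(self.visited)
--
--     def get_coords(self) -> Tuple[int, int]:
--         return (self.x, self.y)
--
-- def walk_grid_with_robo(steps: str):
--     santa = Locataion()
--     robot = Locataion()
--     ledger: Set[Tuple[int, int]] = {(0, 0)}
--
--     for turn, step in enumerate(steps):
--         if turn % 2 == 0:
--             santa.move(step)
--             ledger.add(santa.get_coords())
--         else:
--             robot.move(step)
--             ledger.add(robot.get_coords())
--
--     return len(ledger)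
-- ===== SOURCE B (Python) =====
-- def walk_grid_with_robo(steps: str):
--     delta = {'^': (0, 1), '>': (1, 0), 'v': (0, -1), '<': (-1, 0)}
--
--     def path(moves):
--         x = y = 0
--         positions = []
--         for step in moves:
--             assert step in ('^', '>', 'v', '<')
--             dx, dy = delta[step]
--             x += dx
--             y += dy
--             positions.append((x, y))
--         return positions
--
--     visited = {(0, 0)}
--     visited.update(path(steps[0::2]))
--     visited.update(path(steps[1::2]))
--     return len(visited)
-- ===== Notes on version B (the rewrite author's own statement) =====
-- stated objective: simpler
-- what changed: Dropped the stateful Locataion class and the interleaved enumerate loop: B de-interleaves the input into santa's moves steps[0::2] and robot's moves steps[1::2], walks each subsequence independently with a delta-dict helper, and returns the size of the union of the two position lists together with (0,0).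
import Mathlib
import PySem

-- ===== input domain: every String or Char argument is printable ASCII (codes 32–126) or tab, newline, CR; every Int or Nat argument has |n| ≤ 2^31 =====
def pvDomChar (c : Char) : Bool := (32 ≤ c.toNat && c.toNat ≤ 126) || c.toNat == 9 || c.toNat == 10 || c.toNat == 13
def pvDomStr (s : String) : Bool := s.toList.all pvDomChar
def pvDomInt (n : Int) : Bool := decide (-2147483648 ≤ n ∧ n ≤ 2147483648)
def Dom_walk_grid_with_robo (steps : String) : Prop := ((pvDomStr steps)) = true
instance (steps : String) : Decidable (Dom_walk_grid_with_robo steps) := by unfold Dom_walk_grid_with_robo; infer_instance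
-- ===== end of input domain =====

-- B drops A's stateful Locataion class: it de-interleaves the steps into santa's
-- and robot's move subsequences (steps[0::2] / steps[1::2]), walks each one
-- independently, and counts the union of positions together with (0,0).


-- ===== PORT A =====
-- Locataion.move: the assert raises exactly on chars outside '^>v<' (excluded by
-- Pre_); then the if/elif chain in A's order ('<' is the else branch).
def moveA (direction : Char) (p : Int × Int) : Int × Int :=
  if direction = '^' then (p.1, p.2 + 1)
  else if direction = '>' then (p.1 + 1, p.2)
  else if direction = 'v' then (p.1, p.2 - 1)
  else (p.1 - 1, p.2)

-- the body of A's 'for turn, step in enumerate(steps)' loop; state =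
-- (santa coords, robot coords, ledger).  (Each Locataion's private 'visited'
-- dict never influences the returned value — only the coords and the ledger do —
-- so the fold state carries exactly the observable state.)
def stepA (st : (Int × Int) × (Int × Int) × PySem.Set (Int × Int))
    (p : Int × Char) : (Int × Int) × (Int × Int) × PySem.Set (Int × Int) :=
  if PySem.Int.mod p.1 2 = 0 then
    let s' := moveA p.2 st.1
    (s', st.2.1, PySem.Set.add st.2.2 s')
  else
    let r' := moveA p.2 st.2.1
    (st.1, r', PySem.Set.add st.2.2 r')

def walk_grid_with_robo (steps : String) : Int :=
  let ledger : PySem.Set (Int × Int) := PySem.Set.ofList [((0 : Int), (0 : Int))]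
  let st := (PySem.List.enumerate steps.toList 0).foldl stepA (((0 : Int), (0 : Int)), ((0 : Int), (0 : Int)), ledger)
  PySem.Set.len st.2.2

-- ===== PORT B =====
-- the dict literal 'delta'
def deltaDict : PySem.Dict Char (Int × Int) :=
  (((PySem.Dict.empty).insert '^' ((0 : Int), (1 : Int))).insert '>' ((1 : Int), (0 : Int))
      |>.insert 'v' ((0 : Int), (-1 : Int))).insert '<' ((-1 : Int), (0 : Int))

-- helper 'path': walks one move subsequence from (0,0), collecting the positions
-- after each move.  'delta[step]' cannot raise KeyError after the assert (the
-- assert is what Pre_ excludes), so the lookup is ported with default (0,0).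
def pathB (x y : Int) : List Char → List (Int × Int)
  | [] => []
  | c :: cs =>
    let d := (PySem.Dict.get? deltaDict c).getD (0, 0)
    let x' := x + d.1
    let y' := y + d.2
    (x', y') :: pathB x' y' cs

def walk_grid_with_robo_alt (steps : String) : Int :=
  let l := steps.toList
  let santa := (PySem.List.slice? l (some 0) none 2).getD []   -- steps[0::2]
  let robot := (PySem.List.slice? l (some 1) none 2).getD []   -- steps[1::2]
  let visited := PySem.Set.update
      (PySem.Set.update (PySem.Set.ofList [((0 : Int), (0 : Int))]) (pathB 0 0 santa))
      (pathB 0 0 robot)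
  PySem.Set.len visited

-- ===== PRECONDITION & SPEC =====
-- Pre_ excludes exactly the strings containing a non-direction character, on
-- which A's assert raises AssertionError (B's assert raises there too).
def Pre_walk_grid_with_robo (steps : String) : Prop :=
  (steps.toList.all (fun c => c == '^' || c == '>' || c == 'v' || c == '<')) = true
instance (steps : String) : Decidable (Pre_walk_grid_with_robo steps) := by
  unfold Pre_walk_grid_with_robo; infer_instance

def pvWitness_walk_grid_with_robo : String := "^>v<>"

def Spec_walk_grid_with_robo (steps : String) (out : Int) : Prop := out = walk_grid_with_robo_alt steps
instance (steps : String) (out : Int) : Decidable (Spec_walk_grid_with_robo steps out) := by unfold Spec_walk_grid_with_robo; infer_instance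

-- ===== CLAIM (what is proved, stated in full; the proofs are below) =====
def Claim_equal_walk_grid_with_robo : Prop := ∀ (steps : String), Dom_walk_grid_with_robo steps → Pre_walk_grid_with_robo steps → Spec_walk_grid_with_robo steps (walk_grid_with_robo steps)

-- ===== LEMMAS AND PROOFS =====

-- every other element, starting with the first
def everyOther {α : Type} : List α → List α
  | [] => []
  | [a] => [a]
  | a :: _ :: t => a :: everyOther t

theorem everyOther_cons {α : Type} (c : α) (cs : List α) :
    everyOther (c :: cs) = c :: everyOther cs.tail := by
  cases cs <;> rfl

theorem mem_everyOther {α : Type} {x : α} : ∀ {l : List α}, x ∈ everyOther l → x ∈ l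
  | [], h => h
  | [_], h => h
  | a :: b :: t, h => by
    simp only [everyOther, List.mem_cons] at h ⊢
    rcases h with h | h
    · exact Or.inl h
    · exact Or.inr (Or.inr (mem_everyOther h))

-- the slice machinery of xs[0::2] / xs[1::2] produces everyOther
theorem filterMap_two {α : Type} (m : ℕ) : ∀ (xs : List α), xs.length ≤ 2 * m →
    List.filterMap (fun k : ℕ => xs[(2 * (k : ℤ)).toNat]?) (List.range m) = everyOther xs := by
  induction m with
  | zero =>
    intro xs h
    have : xs = [] := List.eq_nil_of_length_eq_zero (by omega)
    subst this; rfl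
  | succ m ih =>
    intro xs h
    rw [List.range_succ_eq_map, List.filterMap_cons]
    have h0 : ((2 * ((0:ℕ) : ℤ)).toNat) = 0 := by norm_num
    match xs with
    | [] => simp [everyOther]
    | [a] =>
      have heq : ∀ k : ℕ, (([a] : List α)[(2 * ((k:ℕ):ℤ) + 2).toNat]?) = (none : Option α) := by
        intro k
        have h1 : (2 * ((k:ℤ)) + 2).toNat = 2 * k + 2 := by omega
        simp [h1]
      simp only [h0, List.getElem?_cons_zero, List.filterMap_map, Function.comp_def,
        Nat.cast_succ, mul_add, mul_one, heq]
      simp [everyOther]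
    | a :: b :: t =>
      have heq : ∀ k : ℕ, ((a :: b :: t)[(2 * ((k:ℕ):ℤ) + 2).toNat]?) = t[(2 * ((k:ℕ):ℤ)).toNat]? := by
        intro k
        have h1 : (2 * (k:ℤ) + 2).toNat = 2 * k + 2 := by omega
        have h2 : (2 * (k:ℤ)).toNat = 2 * k := by omega
        simp [h1, h2]
      simp only [h0, List.getElem?_cons_zero, List.filterMap_map, Function.comp_def,
        Nat.cast_succ, mul_add, mul_one, heq]
      rw [ih t (by simp at h ⊢; omega)]
      rfl

theorem slice_evens {α : Type} (l : List α) :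
    PySem.List.slice? l (some 0) none 2 = some (everyOther l) := by
  unfold PySem.List.slice? PySem.List.sliceIndices
  norm_num
  by_cases h : 0 < l.length
  · rw [if_pos h]
    exact filterMap_two _ l (by omega)
  · rw [if_neg h]
    have : l = [] := by cases l with | nil => rfl | cons a t => simp at h
    subst this; rfl

theorem slice_odds {α : Type} (l : List α) :
    PySem.List.slice? l (some 1) none 2 = some (everyOther l.tail) := by
  unfold PySem.List.slice? PySem.List.sliceIndices
  norm_num
  match l with
  | [] => simp [everyOther]
  | a :: t =>
    have heq : ∀ k : ℕ, ((a :: t)[((1:ℤ) + 2 * ((k:ℕ):ℤ)).toNat]?) = t[(2 * ((k:ℕ):ℤ)).toNat]? := by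
      intro k
      have h1 : ((1:ℤ) + 2 * ((k:ℕ):ℤ)).toNat = 2 * k + 1 := by omega
      have h2 : (2 * ((k:ℕ):ℤ)).toNat = 2 * k := by omega
      simp [h1, h2]
    have hmin : min (1:ℤ) (((a :: t).length : ℕ) : ℤ) = 1 := by
      have h1 : (1:ℤ) ≤ (((a :: t).length : ℕ) : ℤ) := by simp only [List.length_cons]; omega
      exact min_eq_left h1
    simp only [hmin, heq]
    by_cases h : 1 < (a :: t).length
    · rw [if_pos h]
      rw [filterMap_two _ t (by simp only [List.length_cons] at h ⊢; omega)]
      rfl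
    · rw [if_neg h]
      have ht : t = [] := by
        cases t with | nil => rfl | cons b u => simp at h
      subst ht; rfl

-- path taken by A's mover
def pathA (p : Int × Int) : List Char → List (Int × Int)
  | [] => []
  | c :: cs => moveA c p :: pathA (moveA c p) cs

theorem moveA_up (p : Int × Int) : moveA '^' p = (p.1, p.2 + 1) := rfl
theorem moveA_rt (p : Int × Int) : moveA '>' p = (p.1 + 1, p.2) := rfl
theorem moveA_dn (p : Int × Int) : moveA 'v' p = (p.1, p.2 - 1) := rfl
theorem moveA_lt (p : Int × Int) : moveA '<' p = (p.1 - 1, p.2) := rfl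

theorem delta_up : (PySem.Dict.get? deltaDict '^').getD (0, 0) = ((0 : Int), (1 : Int)) := by decide
theorem delta_rt : (PySem.Dict.get? deltaDict '>').getD (0, 0) = ((1 : Int), (0 : Int)) := by decide
theorem delta_dn : (PySem.Dict.get? deltaDict 'v').getD (0, 0) = ((0 : Int), (-1 : Int)) := by decide
theorem delta_lt : (PySem.Dict.get? deltaDict '<').getD (0, 0) = ((-1 : Int), (0 : Int)) := by decide

theorem pathA_eq_pathB (l : List Char) :
    ∀ (x y : Int), (∀ c ∈ l, c = '^' ∨ c = '>' ∨ c = 'v' ∨ c = '<') →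
    pathA (x, y) l = pathB x y l := by
  induction l with
  | nil => intro x y _; rfl
  | cons c cs ih =>
    intro x y h
    have hrest : ∀ a ∈ cs, a = '^' ∨ a = '>' ∨ a = 'v' ∨ a = '<' := fun a ha => h a (by simp [ha])
    rcases h c (by simp) with rfl | rfl | rfl | rfl
    · simp only [pathA, pathB, moveA_up, delta_up]
      rw [show x + (0:ℤ) = x from by ring, ih _ _ hrest]
    · simp only [pathA, pathB, moveA_rt, delta_rt]
      rw [show y + (0:ℤ) = y from by ring, ih _ _ hrest]
    · simp only [pathA, pathB, moveA_dn, delta_dn]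
      rw [show x + (0:ℤ) = x from by ring, show y + (-1:ℤ) = y - 1 from by ring, ih _ _ hrest]
    · simp only [pathA, pathB, moveA_lt, delta_lt]
      rw [show x + (-1:ℤ) = x - 1 from by ring, show y + (0:ℤ) = y from by ring, ih _ _ hrest]

-- membership in A's ledger after the fold
theorem memA (l : List Char) :
    ∀ (n : Int), 0 ≤ n → ∀ (s r : Int × Int) (acc : PySem.Set (Int × Int)) (x : Int × Int),
    (x ∈ ((PySem.List.enumerate l n).foldl stepA (s, r, acc)).2.2 ↔
      x ∈ acc ∨ x ∈ pathA (if PySem.Int.mod n 2 = 0 then s else r) (everyOther l)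
        ∨ x ∈ pathA (if PySem.Int.mod n 2 = 0 then r else s) (everyOther l.tail)) := by
  induction l with
  | nil =>
    intro n _ s r acc x
    simp [PySem.List.enumerate, everyOther, pathA]
  | cons c cs ih =>
    intro n hn s r acc x
    rw [PySem.List.enumerate_cons, List.foldl_cons]
    have hmod : PySem.Int.mod n 2 = n % 2 := PySem.Int.mod_eq_emod_of_pos (by norm_num)
    have hmod1 : PySem.Int.mod (n + 1) 2 = (n + 1) % 2 := PySem.Int.mod_eq_emod_of_pos (by norm_num)
    rw [everyOther_cons]
    by_cases h : PySem.Int.mod n 2 = 0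
    · have h1 : ¬ PySem.Int.mod (n + 1) 2 = 0 := by rw [hmod1]; rw [hmod] at h; omega
      rw [stepA, if_pos h]
      rw [ih (n + 1) (by omega) (moveA c s) r (PySem.Set.add acc (moveA c s)) x]
      rw [if_neg h1, if_neg h1, if_pos h, if_pos h]
      rw [PySem.Set.mem_add]
      simp only [pathA, List.mem_cons, List.tail_cons]
      tauto
    · have h1 : PySem.Int.mod (n + 1) 2 = 0 := by rw [hmod1]; rw [hmod] at h; omega
      rw [stepA, if_neg h]
      rw [ih (n + 1) (by omega) s (moveA c r) (PySem.Set.add acc (moveA c r)) x]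
      rw [if_pos h1, if_pos h1, if_neg h, if_neg h]
      rw [PySem.Set.mem_add]
      simp only [pathA, List.mem_cons, List.tail_cons]
      tauto

-- A's ledger stays duplicate-free through the fold
theorem nodupA (l : List (Int × Char)) :
    ∀ (s r : Int × Int) (acc : PySem.Set (Int × Int)), acc.Nodup →
    ((l.foldl stepA (s, r, acc)).2.2).Nodup := by
  induction l with
  | nil => intro s r acc h; exact h
  | cons p ps ih =>
    intro s r acc h
    rw [List.foldl_cons, stepA]
    by_cases hp : PySem.Int.mod p.1 2 = 0
    · rw [if_pos hp]; exact ih _ _ _ (PySem.Set.nodup_add _ _ h)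
    · rw [if_neg hp]; exact ih _ _ _ (PySem.Set.nodup_add _ _ h)

-- ===== VERDICT (by name: the statement is the Claim_ definition above) =====
theorem walk_grid_with_robo_spec : Claim_equal_walk_grid_with_robo := by
  intro steps _ hpre0
  unfold Pre_walk_grid_with_robo at hpre0
  simp only [List.all_eq_true, Bool.or_eq_true, beq_iff_eq] at hpre0
  have hpre : ∀ c ∈ steps.toList, c = '^' ∨ c = '>' ∨ c = 'v' ∨ c = '<' :=
    fun c hc => by have := hpre0 c hc; tauto
  unfold Spec_walk_grid_with_robo walk_grid_with_robo walk_grid_with_robo_alt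
  simp only [slice_evens, slice_odds, Option.getD_some]
  set l := steps.toList with hl
  -- both sides are lengths of Nodup lists with the same members
  have hA : (((PySem.List.enumerate l 0).foldl stepA
      (((0 : Int), (0 : Int)), ((0 : Int), (0 : Int)),
        PySem.Set.ofList [((0 : Int), (0 : Int))])).2.2).Perm
      (PySem.Set.update
        (PySem.Set.update (PySem.Set.ofList [((0 : Int), (0 : Int))]) (pathB 0 0 (everyOther l)))
        (pathB 0 0 (everyOther l.tail))) := by
    rw [List.perm_ext_iff_of_nodup
      (nodupA _ _ _ _ (PySem.Set.nodup_ofList _))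
      (PySem.Set.nodup_update _ _ (PySem.Set.nodup_update _ _ (PySem.Set.nodup_ofList _)))]
    intro x
    rw [memA l 0 (by norm_num) _ _ _ x]
    have hps : pathA ((0 : Int), (0 : Int)) (everyOther l) = pathB 0 0 (everyOther l) :=
      pathA_eq_pathB _ _ _ (fun c hc => hpre c (mem_everyOther hc))
    have hpr : pathA ((0 : Int), (0 : Int)) (everyOther l.tail) = pathB 0 0 (everyOther l.tail) :=
      pathA_eq_pathB _ _ _ (fun c hc => hpre c (List.mem_of_mem_tail (mem_everyOther hc)))
    rw [PySem.Set.mem_update, PySem.Set.mem_update, PySem.Set.mem_ofList]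
    simp only [PySem.Int.mod]
    norm_num [hps, hpr]
    tauto
  simp only [PySem.Set.len]
  exact_mod_cast hA.length_eq
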